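-- pv_equiv track=rewrite | github.com/nbarker2021/Aletheia2 | unified/all_cqe/cqe_modules/cqe_modules__complete_system.py | _check_helicity_coherence
-- ===== SOURCE A (Python) =====
-- from typing import Dict, List, Tuple, Optional, Union, Any, Set
--
-- def _check_helicity_coherence(braid: List[Tuple[int, int]]) -> bool:
--     """Check helicity (signed phase slope) coherence."""
--     if len(braid) < 2:
--         return True
--
--     # Compute phase slopes
--     slopes = []
--     for i in range(len(braid) - 1):
--         curr_pair = braid[i]
--         next_pair = braid[i + 1]
--
--         # Simplified helicity calculation
--         slope = (next_pair[0] - curr_pair[0]) + (next_pair[1] - curr_pair[1])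
--         slopes.append(slope)
--
--     # Check coherence (all slopes have same sign or are zero)
--     if not slopes:
--         return True
--
--     positive_slopes = sum(1 for s in slopes if s > 0)
--     negative_slopes = sum(1 for s in slopes if s < 0)
--
--     return positive_slopes == 0 or negative_slopes == 0
-- ===== SOURCE B (Python) =====
-- def _check_helicity_coherence(braid):
--     """Check helicity (signed phase slope) coherence.
--
--     Since slope_i = v[i+1] - v[i] for v[i] = braid[i][0] + braid[i][1],
--     'all slopes share a sign (or are zero)' is exactly 'v is monotonic'.
--     """
--     v = [p[0] + p[1] for p in braid]
--     return v == sorted(v) or v == sorted(v, reverse=True)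
-- ===== Notes on version B (the rewrite author's own statement) =====
-- stated objective: idiomatic
-- what changed: Replaced the explicit slope list and the two sign-counting comprehensions by a monotonicity check: compare the per-pair sum sequence with its sorted and reverse-sorted versions.
import Mathlib
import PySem

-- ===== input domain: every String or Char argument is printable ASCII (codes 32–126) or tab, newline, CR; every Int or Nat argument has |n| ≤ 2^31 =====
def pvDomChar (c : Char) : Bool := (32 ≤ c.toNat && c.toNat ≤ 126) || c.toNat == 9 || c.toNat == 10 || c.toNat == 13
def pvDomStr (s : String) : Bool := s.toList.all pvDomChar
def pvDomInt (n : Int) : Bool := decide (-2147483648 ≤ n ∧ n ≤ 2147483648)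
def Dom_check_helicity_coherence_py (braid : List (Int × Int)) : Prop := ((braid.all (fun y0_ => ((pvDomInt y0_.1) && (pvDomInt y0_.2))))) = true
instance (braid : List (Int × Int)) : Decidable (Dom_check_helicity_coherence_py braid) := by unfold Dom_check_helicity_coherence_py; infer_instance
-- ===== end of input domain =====

-- B replaces A's slope list and sign counting by comparing the per-pair sum
-- sequence with its sorted / reverse-sorted version (a monotonicity check);
-- objective: idiomatic, not faster.

-- ===== PORT A =====
-- indices produced by pyRange 0 (len-1) 1 are always in range, so pyGetD is exact here
def check_helicity_coherence_py (braid : List (Int × Int)) : Bool :=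
  if braid.length < 2 then true
  else
    let slopes := (PySem.List.pyRange 0 ((braid.length : Int) - 1) 1).foldl
      (fun acc i =>
        let curr := PySem.List.pyGetD braid i (0, 0)
        let next := PySem.List.pyGetD braid (i + 1) (0, 0)
        acc ++ [(next.1 - curr.1) + (next.2 - curr.2)]) []
    if slopes = [] then true
    else
      let positive_slopes := (slopes.map (fun s => if s > 0 then (1 : Int) else 0)).sum
      let negative_slopes := (slopes.map (fun s => if s < 0 then (1 : Int) else 0)).sum
      positive_slopes == 0 || negative_slopes == 0

-- ===== PORT B =====
def check_helicity_coherence_py_alt (braid : List (Int × Int)) : Bool :=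
  let v := braid.map (fun p => p.1 + p.2)
  (v == PySem.List.sorted v (fun x => x) false) || (v == PySem.List.sorted v (fun x => x) true)

-- ===== PRECONDITION & SPEC =====
def Spec_check_helicity_coherence_py (braid : List (Int × Int)) (out : Bool) : Prop := out = check_helicity_coherence_py_alt braid
instance (braid : List (Int × Int)) (out : Bool) : Decidable (Spec_check_helicity_coherence_py braid out) := by unfold Spec_check_helicity_coherence_py; infer_instance

-- ===== CLAIM (what is proved, stated in full; the proofs are below) =====
def Claim_equal_check_helicity_coherence_py : Prop := ∀ (braid : List (Int × Int)), Dom_check_helicity_coherence_py braid → Spec_check_helicity_coherence_py braid (check_helicity_coherence_py braid)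

-- ===== LEMMAS AND PROOFS =====

-- A's slope list is the adjacent-difference list of v = map (fun p => p.1 + p.2) braid
lemma pv_slopes_eq (braid : List (Int × Int)) :
    (PySem.List.pyRange 0 ((braid.length : Int) - 1) 1).foldl
      (fun acc i =>
        acc ++ [((PySem.List.pyGetD braid (i + 1) (0, 0)).1 - (PySem.List.pyGetD braid i (0, 0)).1)
              + ((PySem.List.pyGetD braid (i + 1) (0, 0)).2 - (PySem.List.pyGetD braid i (0, 0)).2)]) []
    = List.zipWith (fun a b => b - a) (braid.map (fun p => p.1 + p.2)) (braid.map (fun p => p.1 + p.2)).tail := by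
  rw [PySem.List.foldl_append_singleton_eq_map, PySem.List.pyRange_one]
  apply List.ext_getElem
  · simp
  · intro k h1 h2
    have hk : k + 1 < braid.length := by simp at h1; omega
    have hk0 : k < braid.length := by omega
    simp only [List.nil_append, List.getElem_map, List.getElem_zipWith, List.getElem_tail,
      List.getElem_range]
    have e2 : (0 : Int) + (k : Int) + 1 = (((k + 1 : Nat)) : Int) := by omega
    have e1 : (0 : Int) + (k : Int) = ((k : Nat) : Int) := by omega
    rw [e2, e1, PySem.List.pyGetD_natCast, PySem.List.pyGetD_natCast,
        List.getD_eq_getElem _ _ hk0, List.getD_eq_getElem _ _ hk]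
    ring

lemma pv_nonneg_iff_chain (v : List Int) :
    (∀ s ∈ List.zipWith (fun a b => b - a) v v.tail, ¬ s < 0) ↔ List.IsChain (· ≤ ·) v := by
  induction v with
  | nil => simp
  | cons a t ih =>
    cases t with
    | nil => exact ⟨fun _ => List.isChain_singleton a, fun _ s hs => by simp at hs⟩
    | cons b t' =>
      simp only [List.tail_cons, List.zipWith_cons_cons, List.mem_cons, List.isChain_cons_cons]
      constructor
      · intro h
        refine ⟨by have := h _ (Or.inl rfl); omega, ?_⟩
        exact (ih).1 (fun s hs => h s (Or.inr hs))
      · rintro ⟨hab, hch⟩ s hs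
        rcases hs with rfl | hs
        · omega
        · exact (ih).2 hch s hs

lemma pv_nonpos_iff_chain (v : List Int) :
    (∀ s ∈ List.zipWith (fun a b => b - a) v v.tail, ¬ s > 0) ↔ List.IsChain (fun a b => b ≤ a) v := by
  induction v with
  | nil => simp
  | cons a t ih =>
    cases t with
    | nil => exact ⟨fun _ => List.isChain_singleton a, fun _ s hs => by simp at hs⟩
    | cons b t' =>
      simp only [List.tail_cons, List.zipWith_cons_cons, List.mem_cons, List.isChain_cons_cons]
      constructor
      · intro h
        refine ⟨by have := h _ (Or.inl rfl); omega, ?_⟩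
        exact (ih).1 (fun s hs => h s (Or.inr hs))
      · rintro ⟨hab, hch⟩ s hs
        rcases hs with rfl | hs
        · omega
        · exact (ih).2 hch s hs

lemma pv_sum_ite_nonneg (p : Int → Prop) [DecidablePred p] (xs : List Int) :
    0 ≤ (xs.map (fun s => if p s then (1 : Int) else 0)).sum := by
  induction xs with
  | nil => simp
  | cons a t ih => simp only [List.map_cons, List.sum_cons]; split_ifs <;> omega

lemma pv_sum_ite_zero (p : Int → Prop) [DecidablePred p] (xs : List Int) :
    ((xs.map (fun s => if p s then (1 : Int) else 0)).sum = 0) ↔ ∀ s ∈ xs, ¬ p s := by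
  induction xs with
  | nil => simp
  | cons a t ih =>
    have h0 := pv_sum_ite_nonneg p t
    simp only [List.map_cons, List.sum_cons, List.mem_cons, forall_eq_or_imp, ← ih]
    split_ifs with hp
    · constructor
      · intro h; omega
      · rintro ⟨h, _⟩; exact absurd hp h
    · constructor
      · intro h; exact ⟨hp, by omega⟩
      · rintro ⟨_, h⟩; omega

lemma pv_sorted_iff (v : List Int) :
    (v == PySem.List.sorted v (fun x => x) false) = true ↔ v.Pairwise (· ≤ ·) := by
  rw [beq_iff_eq]
  constructor
  · intro h
    have := PySem.List.sorted_pairwise (xs := v) (key := fun x => x)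
    rw [← h] at this
    exact this
  · intro h
    exact (PySem.List.sorted_eq_self_of_pairwise _ _ h).symm

lemma pv_sorted_rev_iff (v : List Int) :
    (v == PySem.List.sorted v (fun x => x) true) = true ↔ v.Pairwise (fun a b => b ≤ a) := by
  rw [beq_iff_eq]
  constructor
  · intro h
    have := PySem.List.sorted_pairwise_rev (xs := v) (key := fun x => x)
    rw [← h] at this
    exact this
  · intro h
    exact (PySem.List.sorted_rev_eq_self_of_pairwise _ _ h).symm

lemma pv_main (braid : List (Int × Int)) :
    check_helicity_coherence_py braid = check_helicity_coherence_py_alt braid := by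
  rw [Bool.eq_iff_iff]
  set v := braid.map (fun p => p.1 + p.2) with hv
  have hB : check_helicity_coherence_py_alt braid = true ↔
      (v.Pairwise (· ≤ ·) ∨ v.Pairwise (fun a b => b ≤ a)) := by
    unfold check_helicity_coherence_py_alt
    rw [Bool.or_eq_true, pv_sorted_iff, pv_sorted_rev_iff]
  rw [hB]
  unfold check_helicity_coherence_py
  by_cases hlen : braid.length < 2
  · simp only [hlen, if_true, true_iff]
    left
    match braid, hlen with
    | [], _ => simp [hv]
    | [a], _ => simp [hv]

  · simp only [hlen, if_false]
    rw [pv_slopes_eq]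
    set slopes := List.zipWith (fun a b => b - a) v v.tail with hs
    by_cases hnil : slopes = []
    · exfalso
      have hlen' : slopes.length = 0 := by rw [hnil]; rfl
      have hlv : v.length = braid.length := by simp [hv]
      rw [hs, List.length_zipWith, List.length_tail] at hlen'
      omega
    · simp only [hnil, if_false]
      rw [Bool.or_eq_true, beq_iff_eq, beq_iff_eq,
          pv_sum_ite_zero (fun s => s > 0) slopes, pv_sum_ite_zero (fun s => s < 0) slopes,
          pv_nonpos_iff_chain, pv_nonneg_iff_chain,
          List.isChain_iff_pairwise, List.isChain_iff_pairwise]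
      tauto

-- ===== VERDICT (by name: the statement is the Claim_ definition above) =====
theorem check_helicity_coherence_py_spec : Claim_equal_check_helicity_coherence_py := by
  intro braid _
  unfold Spec_check_helicity_coherence_py
  exact pv_main braid
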